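-- pv_equiv track=rewrite | github.com/atria-tools/lutin | lutinExtProjectGeneratorXCode.py | convert_name_in_base_id
-- ===== SOURCE A (Python) =====
-- def convert_name_in_base_id(name,fill=True):
-- 	out = ""
-- 	for element in name.lower():
-- 		if   element == "a": out += "01"
-- 		elif element == "b": out += "02"
-- 		elif element == "c": out += "03"
-- 		elif element == "d": out += "04"
-- 		elif element == "e": out += "05"
-- 		elif element == "f": out += "06"
-- 		elif element == "g": out += "07"
-- 		elif element == "h": out += "08"
-- 		elif element == "i": out += "09"
-- 		elif element == "j": out += "10"
-- 		elif element == "k": out += "11"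
-- 		elif element == "l": out += "12"
-- 		elif element == "m": out += "13"
-- 		elif element == "n": out += "14"
-- 		elif element == "o": out += "15"
-- 		elif element == "p": out += "16"
-- 		elif element == "q": out += "17"
-- 		elif element == "r": out += "18"
-- 		elif element == "s": out += "19"
-- 		elif element == "t": out += "20"
-- 		elif element == "u": out += "21"
-- 		elif element == "v": out += "22"
-- 		elif element == "w": out += "23"
-- 		elif element == "x": out += "24"
-- 		elif element == "y": out += "25"
-- 		elif element == "z": out += "27"
-- 		else:                out += "FF"
-- 		if len(out) >= 18:
-- 			return out
-- 	if fill == True: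
-- 		for iii in range(0,256):
-- 			out += "A"
-- 			if len(out) >= 18:
-- 				return out
-- 	return out
-- ===== SOURCE B (Python) =====
-- _TABLE = "0102030405060708091011121314151617181920212223242527"
--
-- def _enc(s):
--     if not s:
--         return ""
--     k = ord(s[0]) - 97
--     code = _TABLE[2 * k:2 * k + 2] if 0 <= k < 26 else "FF"
--     return code + _enc(s[1:])
--
-- def convert_name_in_base_id(name, fill=True):
--     out = _enc(name.lower()[:9])
--     if len(name) >= 9 or not fill:
--         return out
--     return out.ljust(18, "A")
-- ===== Notes on version B (the rewrite author's own statement) =====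
-- stated objective: alternative
-- what changed: Instead of A's stateful accumulation loop with a length-based early return plus a 256-iteration fill loop, B truncates the INPUT to its first 9 lowered characters, encodes that prefix by structural recursion with a slice into one constant code-table string, and decides padding from len(name) alone (ljust to 18), so no output-length checks or fill loop exist.
import Mathlib
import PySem

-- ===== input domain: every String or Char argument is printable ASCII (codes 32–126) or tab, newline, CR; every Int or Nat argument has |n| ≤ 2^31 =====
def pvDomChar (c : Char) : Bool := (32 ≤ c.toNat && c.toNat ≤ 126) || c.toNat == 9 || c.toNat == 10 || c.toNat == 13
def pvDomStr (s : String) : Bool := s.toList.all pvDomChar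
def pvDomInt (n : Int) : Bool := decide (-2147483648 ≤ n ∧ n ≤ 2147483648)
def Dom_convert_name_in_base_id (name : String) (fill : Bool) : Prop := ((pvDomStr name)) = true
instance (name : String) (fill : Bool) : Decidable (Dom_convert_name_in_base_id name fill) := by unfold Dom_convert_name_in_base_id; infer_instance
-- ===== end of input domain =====

-- B replaces A's stateful accumulation loop (with its output-length early return) and the
-- 256-step fill loop by: truncate the input to its first 9 lowered characters, encode that
-- prefix by structural recursion with slices into a constant code-table string, and pad by
-- ljust based on len(name) alone (objective: alternative decomposition).

-- ===== PORT A =====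
-- the if/elif chain of A, appending a 2-char code per character
def pvCodeA (c : Char) : List Char :=
  if c = 'a' then ['0','1'] else
  if c = 'b' then ['0','2'] else
  if c = 'c' then ['0','3'] else
  if c = 'd' then ['0','4'] else
  if c = 'e' then ['0','5'] else
  if c = 'f' then ['0','6'] else
  if c = 'g' then ['0','7'] else
  if c = 'h' then ['0','8'] else
  if c = 'i' then ['0','9'] else
  if c = 'j' then ['1','0'] else
  if c = 'k' then ['1','1'] else
  if c = 'l' then ['1','2'] else
  if c = 'm' then ['1','3'] else
  if c = 'n' then ['1','4'] else
  if c = 'o' then ['1','5'] else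
  if c = 'p' then ['1','6'] else
  if c = 'q' then ['1','7'] else
  if c = 'r' then ['1','8'] else
  if c = 's' then ['1','9'] else
  if c = 't' then ['2','0'] else
  if c = 'u' then ['2','1'] else
  if c = 'v' then ['2','2'] else
  if c = 'w' then ['2','3'] else
  if c = 'x' then ['2','4'] else
  if c = 'y' then ['2','5'] else
  if c = 'z' then ['2','7'] else
  ['F','F']

-- A's main loop: append the code, return early (flag true) once len(out) >= 18
def pvLoopA : List Char → List Char → List Char × Bool
  | [], out => (out, false)
  | c :: rest, out =>
    let out2 := out ++ pvCodeA c
    if 18 ≤ out2.length then (out2, true) else pvLoopA rest out2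

-- A's fill loop: for iii in range(0,256): out += "A"; early return once len(out) >= 18
def pvFillA : Nat → List Char → List Char
  | 0, out => out
  | n+1, out =>
    let out2 := out ++ ['A']
    if 18 ≤ out2.length then out2 else pvFillA n out2

def convert_name_in_base_id (name : String) (fill : Bool) : String :=
  let r := pvLoopA (PySem.Chars.lower name.toList) []
  if r.2 then String.ofList r.1
  else if fill then String.ofList (pvFillA 256 r.1)
  else String.ofList r.1

-- ===== PORT B =====
-- Source B's _TABLE constant
def pvTableB : List Char := "0102030405060708091011121314151617181920212223242527".toList

-- Source B's per-character code: _TABLE[2*k:2*k+2] if 0 <= k < 26 else "FF", k = ord(c) - 97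
def pvCodeB (c : Char) : List Char :=
  let k : Int := (c.toNat : Int) - 97
  if 0 ≤ k ∧ k < 26 then (pvTableB.drop (2 * k.toNat)).take 2 else ['F','F']

-- Source B's _enc: structural recursion, code of the head ++ _enc of the tail
def pvEncB : List Char → List Char
  | [] => []
  | c :: rest => pvCodeB c ++ pvEncB rest

def convert_name_in_base_id_alt (name : String) (fill : Bool) : String :=
  let out := pvEncB ((PySem.Chars.lower name.toList).take 9)   -- _enc(name.lower()[:9])
  if 9 ≤ name.toList.length ∨ fill = false then String.ofList out
  -- out.ljust(18, "A"), hand-ported: pad on the right with 'A' up to length 18 (exact for len ≤ 18)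
  else String.ofList (out ++ List.replicate (18 - out.length) 'A')

-- ===== PRECONDITION & SPEC =====
def Spec_convert_name_in_base_id (name : String) (fill : Bool) (out : String) : Prop := out = convert_name_in_base_id_alt name fill
instance (name : String) (fill : Bool) (out : String) : Decidable (Spec_convert_name_in_base_id name fill out) := by unfold Spec_convert_name_in_base_id; infer_instance

-- ===== CLAIM (what is proved, stated in full; the proofs are below) =====
def Claim_equal_convert_name_in_base_id : Prop := ∀ (name : String) (fill : Bool), Dom_convert_name_in_base_id name fill → Spec_convert_name_in_base_id name fill (convert_name_in_base_id name fill)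

-- ===== LEMMAS AND PROOFS =====

theorem pvCharEqOfToNat {c d : Char} (h : c.toNat = d.toNat) : c = d :=
  Char.ext (UInt32.toNat_inj.mp h)

theorem pvCodeA_len (c : Char) : (pvCodeA c).length = 2 := by
  simp [pvCodeA, apply_ite List.length]

theorem pvCodeB_eq (c : Char) : pvCodeB c = pvCodeA c := by
  by_cases h1 : c = 'a'
  · subst h1; decide
  by_cases h2 : c = 'b'
  · subst h2; decide
  by_cases h3 : c = 'c'
  · subst h3; decide
  by_cases h4 : c = 'd'
  · subst h4; decide
  by_cases h5 : c = 'e'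
  · subst h5; decide
  by_cases h6 : c = 'f'
  · subst h6; decide
  by_cases h7 : c = 'g'
  · subst h7; decide
  by_cases h8 : c = 'h'
  · subst h8; decide
  by_cases h9 : c = 'i'
  · subst h9; decide
  by_cases h10 : c = 'j'
  · subst h10; decide
  by_cases h11 : c = 'k'
  · subst h11; decide
  by_cases h12 : c = 'l'
  · subst h12; decide
  by_cases h13 : c = 'm'
  · subst h13; decide
  by_cases h14 : c = 'n'
  · subst h14; decide
  by_cases h15 : c = 'o'
  · subst h15; decide
  by_cases h16 : c = 'p'
  · subst h16; decide
  by_cases h17 : c = 'q'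
  · subst h17; decide
  by_cases h18 : c = 'r'
  · subst h18; decide
  by_cases h19 : c = 's'
  · subst h19; decide
  by_cases h20 : c = 't'
  · subst h20; decide
  by_cases h21 : c = 'u'
  · subst h21; decide
  by_cases h22 : c = 'v'
  · subst h22; decide
  by_cases h23 : c = 'w'
  · subst h23; decide
  by_cases h24 : c = 'x'
  · subst h24; decide
  by_cases h25 : c = 'y'
  · subst h25; decide
  by_cases h26 : c = 'z'
  · subst h26; decide
  -- default branch of both: c is none of a..z, so ord(c) - 97 is outside [0, 26)
  have n1 : c.toNat ≠ 97 := fun hc => h1 (pvCharEqOfToNat (d := 'a') hc)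
  have n2 : c.toNat ≠ 98 := fun hc => h2 (pvCharEqOfToNat (d := 'b') hc)
  have n3 : c.toNat ≠ 99 := fun hc => h3 (pvCharEqOfToNat (d := 'c') hc)
  have n4 : c.toNat ≠ 100 := fun hc => h4 (pvCharEqOfToNat (d := 'd') hc)
  have n5 : c.toNat ≠ 101 := fun hc => h5 (pvCharEqOfToNat (d := 'e') hc)
  have n6 : c.toNat ≠ 102 := fun hc => h6 (pvCharEqOfToNat (d := 'f') hc)
  have n7 : c.toNat ≠ 103 := fun hc => h7 (pvCharEqOfToNat (d := 'g') hc)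
  have n8 : c.toNat ≠ 104 := fun hc => h8 (pvCharEqOfToNat (d := 'h') hc)
  have n9 : c.toNat ≠ 105 := fun hc => h9 (pvCharEqOfToNat (d := 'i') hc)
  have n10 : c.toNat ≠ 106 := fun hc => h10 (pvCharEqOfToNat (d := 'j') hc)
  have n11 : c.toNat ≠ 107 := fun hc => h11 (pvCharEqOfToNat (d := 'k') hc)
  have n12 : c.toNat ≠ 108 := fun hc => h12 (pvCharEqOfToNat (d := 'l') hc)
  have n13 : c.toNat ≠ 109 := fun hc => h13 (pvCharEqOfToNat (d := 'm') hc)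
  have n14 : c.toNat ≠ 110 := fun hc => h14 (pvCharEqOfToNat (d := 'n') hc)
  have n15 : c.toNat ≠ 111 := fun hc => h15 (pvCharEqOfToNat (d := 'o') hc)
  have n16 : c.toNat ≠ 112 := fun hc => h16 (pvCharEqOfToNat (d := 'p') hc)
  have n17 : c.toNat ≠ 113 := fun hc => h17 (pvCharEqOfToNat (d := 'q') hc)
  have n18 : c.toNat ≠ 114 := fun hc => h18 (pvCharEqOfToNat (d := 'r') hc)
  have n19 : c.toNat ≠ 115 := fun hc => h19 (pvCharEqOfToNat (d := 's') hc)
  have n20 : c.toNat ≠ 116 := fun hc => h20 (pvCharEqOfToNat (d := 't') hc)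
  have n21 : c.toNat ≠ 117 := fun hc => h21 (pvCharEqOfToNat (d := 'u') hc)
  have n22 : c.toNat ≠ 118 := fun hc => h22 (pvCharEqOfToNat (d := 'v') hc)
  have n23 : c.toNat ≠ 119 := fun hc => h23 (pvCharEqOfToNat (d := 'w') hc)
  have n24 : c.toNat ≠ 120 := fun hc => h24 (pvCharEqOfToNat (d := 'x') hc)
  have n25 : c.toNat ≠ 121 := fun hc => h25 (pvCharEqOfToNat (d := 'y') hc)
  have n26 : c.toNat ≠ 122 := fun hc => h26 (pvCharEqOfToNat (d := 'z') hc)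
  have hA : pvCodeA c = ['F','F'] := by
    simp [pvCodeA, h1, h2, h3, h4, h5, h6, h7, h8, h9, h10, h11, h12, h13, h14, h15, h16, h17, h18, h19, h20, h21, h22, h23, h24, h25, h26]
  have hrange : ¬ (0 ≤ (c.toNat : Int) - 97 ∧ (c.toNat : Int) - 97 < 26) := by omega
  rw [hA, pvCodeB]
  simp only [if_neg hrange]

theorem pvEncB_eq (cs : List Char) : pvEncB cs = (cs.map pvCodeA).flatten := by
  induction cs with
  | nil => rfl
  | cons c rest ih => simp [pvEncB, pvCodeB_eq, ih]

theorem pvEnc_len (cs : List Char) : ((cs.map pvCodeA).flatten).length = 2 * cs.length := by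
  induction cs with
  | nil => rfl
  | cons c rest ih => simp [ih, pvCodeA_len]; omega

theorem pvFlatten_take (cs : List Char) : ∀ n : Nat,
    ((cs.map pvCodeA).flatten).take (2 * n) = (((cs.take n).map pvCodeA)).flatten := by
  induction cs with
  | nil => intro n; simp
  | cons c rest ih =>
    intro n
    cases n with
    | zero => simp
    | succ m =>
      have h2 : 2 * (m + 1) = (pvCodeA c).length + 2 * m := by rw [pvCodeA_len]; omega
      simp only [List.map_cons, List.flatten_cons, List.take_succ_cons, h2,
        List.take_append]
      rw [List.take_of_length_le (Nat.le_add_right _ _), Nat.add_sub_cancel_left, ih]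

theorem pvLoopA_spec (cs : List Char) : ∀ out : List Char, out.length % 2 = 0 → out.length < 18 →
    pvLoopA cs out = if 18 ≤ out.length + 2 * cs.length
      then ((out ++ (cs.map pvCodeA).flatten).take 18, true)
      else (out ++ (cs.map pvCodeA).flatten, false) := by
  induction cs with
  | nil =>
    intro out he hlt
    rw [if_neg (by simp only [List.length_nil]; omega)]
    simp [pvLoopA]
  | cons c rest ih =>
    intro out he hlt
    have hc : (pvCodeA c).length = 2 := pvCodeA_len c
    simp only [pvLoopA]
    have hlen : (out ++ pvCodeA c).length = out.length + 2 := by simp [hc]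
    have hflat : out ++ ((c :: rest).map pvCodeA).flatten
        = (out ++ pvCodeA c) ++ (rest.map pvCodeA).flatten := by
      simp
    by_cases h18 : 18 ≤ (out ++ pvCodeA c).length
    · have h18' : (out ++ pvCodeA c).length = 18 := by omega
      rw [if_pos h18, if_pos (by simp; omega)]
      rw [hflat, List.take_left' h18']
    · rw [if_neg h18, ih _ (by omega) (by omega)]
      by_cases hcond : 18 ≤ out.length + 2 * (c :: rest).length
      · rw [if_pos (by simp at hcond ⊢; omega), if_pos hcond, hflat]
      · rw [if_neg (by simp at hcond ⊢; omega), if_neg hcond, hflat]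

theorem pvFillA_spec : ∀ (n : Nat) (out : List Char), out.length < 18 → 18 ≤ out.length + n →
    pvFillA n out = out ++ List.replicate (18 - out.length) 'A' := by
  intro n
  induction n with
  | zero => intro out h1 h2; omega
  | succ n ih =>
    intro out h1 h2
    simp only [pvFillA]
    have hlen : (out ++ ['A']).length = out.length + 1 := by simp
    by_cases h18 : 18 ≤ (out ++ ['A']).length
    · have h17 : out.length = 17 := by omega
      rw [if_pos h18, h17]
      rfl
    · rw [if_neg h18, ih _ (by omega) (by omega), hlen]
      have hrep : List.replicate (18 - out.length) 'A'
          = 'A' :: List.replicate (18 - (out.length + 1)) 'A' := by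
        have : 18 - out.length = (18 - (out.length + 1)) + 1 := by omega
        rw [this, List.replicate_succ]
      rw [hrep]
      simp

theorem pvLower_len (cs : List Char) : (PySem.Chars.lower cs).length = cs.length := by
  simp [PySem.Chars.lower]

-- ===== VERDICT (by name: the statement is the Claim_ definition above) =====
theorem convert_name_in_base_id_spec : Claim_equal_convert_name_in_base_id := by
  intro name fill _
  unfold Spec_convert_name_in_base_id convert_name_in_base_id convert_name_in_base_id_alt
  rw [pvLoopA_spec _ [] rfl (by decide), pvEncB_eq]
  have hlen := pvLower_len name.toList
  simp only [List.nil_append, List.length_nil, Nat.zero_add]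
  by_cases h9 : 9 ≤ name.toList.length
  · have hc : 18 ≤ 2 * (PySem.Chars.lower name.toList).length := by omega
    have htake : ((PySem.Chars.lower name.toList).map pvCodeA).flatten.take 18
        = (((PySem.Chars.lower name.toList).take 9).map pvCodeA).flatten := by
      have := pvFlatten_take (PySem.Chars.lower name.toList) 9
      simpa using this
    rw [if_pos (show (9:Nat) ≤ name.toList.length ∨ fill = false from Or.inl h9)]
    simp [hc, htake]
  · have hc : ¬ 18 ≤ 2 * (PySem.Chars.lower name.toList).length := by omega
    have htake : (PySem.Chars.lower name.toList).take 9 = PySem.Chars.lower name.toList :=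
      List.take_of_length_le (by omega)
    have hout : (((PySem.Chars.lower name.toList).map pvCodeA).flatten).length
        = 2 * (PySem.Chars.lower name.toList).length := pvEnc_len _
    simp only [if_neg hc, htake]
    cases fill with
    | false => simp
    | true =>
      simp only [Bool.true_eq_false, or_false, if_neg h9]
      rw [pvFillA_spec 256 _ (by omega) (by omega), hout]
      simp
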